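-- pv_equiv track=rewrite | github.com/Bluntsord/InterviewPrep | Interview/CreditSuisse/gcc/Question2.py | solution
-- ===== SOURCE A (Python) =====
-- from collections import Counter
--
-- def solution(files):
--     # Write solution here
--     word_dict = dict(Counter(files))
--     answer, odd = 0, 0
--     for key, value in word_dict.items():
--         if value % 2 == 1:
--             odd = 1
--             answer += value - 1
--         else:
--             answer += value
--
--     answer += odd
--     return answer
-- ===== SOURCE B (Python) =====
-- def solution(files):
--     # Sock-pairing single pass: toggle each item in a set of currently-unpaired
--     # items; each toggle-off completes a pair. No frequency table is built.
--     unpaired = set()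
--     pairs = 0
--     for f in files:
--         if f in unpaired:
--             unpaired.discard(f)
--             pairs += 1
--         else:
--             unpaired.add(f)
--     return 2 * pairs + (1 if unpaired else 0)
-- ===== Notes on version B (the rewrite author's own statement) =====
-- stated objective: alternative
-- what changed: Replaces the Counter frequency table plus a parity-branching loop over its items by a streaming sock-pairing pass: each item toggles membership in a set of currently-unpaired items, every toggle-off completes a pair, and the answer is 2*pairs plus 1 if anything is left unpaired.
import Mathlib
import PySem

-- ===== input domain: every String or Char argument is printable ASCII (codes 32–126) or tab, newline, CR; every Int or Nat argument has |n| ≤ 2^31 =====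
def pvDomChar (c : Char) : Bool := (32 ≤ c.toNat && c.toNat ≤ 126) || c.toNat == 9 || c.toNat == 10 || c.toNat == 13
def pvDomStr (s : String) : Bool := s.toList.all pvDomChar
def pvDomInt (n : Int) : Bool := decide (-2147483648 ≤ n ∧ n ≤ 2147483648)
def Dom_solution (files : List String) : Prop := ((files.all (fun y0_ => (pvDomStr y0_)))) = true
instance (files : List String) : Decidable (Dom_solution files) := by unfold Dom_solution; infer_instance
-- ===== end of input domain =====

-- B replaces the Counter table + parity loop by a streaming sock-pairing pass over a set of
-- currently-unpaired items (alternative algorithm, same O(n) cost).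

-- ===== PORT A =====
def solution (files : List String) : Int :=
  let word_dict := PySem.Dict.counter files
  let acc := word_dict.items.foldl
    (fun (p : Int × Int) (kv : String × Int) =>
      if PySem.Int.mod kv.2 2 = 1 then (p.1 + (kv.2 - 1), 1) else (p.1 + kv.2, p.2))
    (0, 0)
  acc.1 + acc.2

-- ===== PORT B =====
def solution_alt (files : List String) : Int :=
  let st := files.foldl
    (fun (st : PySem.Set String × Int) f =>
      if PySem.Set.contains st.1 f then (PySem.Set.discard st.1 f, st.2 + 1)
      else (PySem.Set.add st.1 f, st.2))
    (PySem.Set.empty, 0)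
  2 * st.2 + (if st.1 ≠ [] then 1 else 0)

-- ===== PRECONDITION & SPEC =====
def Spec_solution (files : List String) (out : Int) : Prop := out = solution_alt files
instance (files : List String) (out : Int) : Decidable (Spec_solution files out) := by unfold Spec_solution; infer_instance

-- ===== CLAIM (what is proved, stated in full; the proofs are below) =====
def Claim_equal_solution : Prop := ∀ (files : List String), Dom_solution files → Spec_solution files (solution files)

-- ===== LEMMAS AND PROOFS =====

-- A's loop invariant: the fold keeps (sum adjusted for odd values, the odd-seen flag).
theorem solutionA_foldl (L : List (String × Int)) (a o : Int) :
    L.foldl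
      (fun (p : Int × Int) (kv : String × Int) =>
        if PySem.Int.mod kv.2 2 = 1 then (p.1 + (kv.2 - 1), 1) else (p.1 + kv.2, p.2))
      (a, o)
    = (a + (L.map (·.2)).sum - (L.countP (fun kv => PySem.Int.mod kv.2 2 == 1) : Int),
       if L.countP (fun kv => PySem.Int.mod kv.2 2 == 1) = 0 then o else 1) := by
  induction L generalizing a o with
  | nil => simp
  | cons kv rest ih =>
    by_cases h : PySem.Int.mod kv.2 2 = 1
    · simp only [List.foldl_cons, List.countP_cons, List.map_cons, List.sum_cons, h, if_pos, ih,
        beq_iff_eq]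
      refine Prod.ext ?_ ?_ <;> simp
      ring
    · simp only [List.foldl_cons, List.countP_cons, List.map_cons, List.sum_cons, ih, h,
        beq_iff_eq]
      refine Prod.ext ?_ ?_ <;> simp
      ring

-- parity of a cast count under Python's %
theorem pymod_two_cast (c : Nat) : (PySem.Int.mod (c : Int) 2 == 1) = (c % 2 == 1) := by
  rw [PySem.Int.mod_eq_emod_of_pos (by norm_num), Bool.eq_iff_iff]
  simp only [beq_iff_eq]
  omega

-- removing a present element from a duplicate-free set shrinks it by one
theorem length_discard_of_mem (s : List String) (x : String) (hn : s.Nodup) (hx : x ∈ s) :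
    (PySem.Set.discard s x).length + 1 = s.length := by
  have hperm : (PySem.Set.discard s x).Perm (s.erase x) := by
    refine (List.perm_ext_iff_of_nodup (PySem.Set.nodup_discard s x hn) (hn.erase x)).mpr ?_
    intro k
    rw [PySem.Set.mem_discard, List.Nodup.mem_erase_iff hn]
    tauto
  rw [hperm.length_eq, ← List.length_erase_add_one hx]

-- B's loop invariant: the set holds exactly the odd-count elements, and
-- 2*pairs + |set| = number of items processed.
theorem solutionB_foldl (l : List String) :
    (l.foldl
      (fun (st : PySem.Set String × Int) f =>
        if PySem.Set.contains st.1 f then (PySem.Set.discard st.1 f, st.2 + 1)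
        else (PySem.Set.add st.1 f, st.2))
      (PySem.Set.empty, 0)).1.Nodup ∧
    (∀ k, k ∈ (l.foldl
      (fun (st : PySem.Set String × Int) f =>
        if PySem.Set.contains st.1 f then (PySem.Set.discard st.1 f, st.2 + 1)
        else (PySem.Set.add st.1 f, st.2))
      (PySem.Set.empty, 0)).1 ↔ l.count k % 2 = 1) ∧
    2 * (l.foldl
      (fun (st : PySem.Set String × Int) f =>
        if PySem.Set.contains st.1 f then (PySem.Set.discard st.1 f, st.2 + 1)
        else (PySem.Set.add st.1 f, st.2))
      (PySem.Set.empty, 0)).2 +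
      ((l.foldl
      (fun (st : PySem.Set String × Int) f =>
        if PySem.Set.contains st.1 f then (PySem.Set.discard st.1 f, st.2 + 1)
        else (PySem.Set.add st.1 f, st.2))
      (PySem.Set.empty, 0)).1.length : Int) = l.length := by
  induction l using List.reverseRecOn with
  | nil => simp [PySem.Set.empty]
  | append_singleton l x ih =>
    obtain ⟨hn, hmem, hlen⟩ := ih
    rw [List.foldl_append]
    set st := l.foldl
      (fun (st : PySem.Set String × Int) f =>
        if PySem.Set.contains st.1 f then (PySem.Set.discard st.1 f, st.2 + 1)
        else (PySem.Set.add st.1 f, st.2))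
      (PySem.Set.empty, 0) with hst
    simp only [List.foldl_cons, List.foldl_nil]
    by_cases hx : x ∈ st.1
    · have hc : PySem.Set.contains st.1 x = true := by simpa using hx
      simp only [hc, if_pos]
      have hodd : l.count x % 2 = 1 := (hmem x).mp hx
      have hld := length_discard_of_mem st.1 x hn hx
      refine ⟨PySem.Set.nodup_discard _ _ hn, ?_, ?_⟩
      · intro k
        rw [PySem.Set.mem_discard, hmem k, List.count_append]
        by_cases hk : k = x
        · subst hk
          simp
          omega
        · have hxk : ¬ x = k := fun h => hk h.symm
          simp [hxk, hk]
      · simp only [List.length_append, List.length_singleton]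
        push_cast [← hld]
        omega
    · have hc : PySem.Set.contains st.1 x = false := by simpa using hx
      simp only [hc, Bool.false_eq_true, if_false]
      have heven : ¬ l.count x % 2 = 1 := fun h => hx ((hmem x).mpr h)
      rw [PySem.Set.add_of_not_mem hx]
      refine ⟨?_, ?_, ?_⟩
      · rw [List.nodup_append]
        refine ⟨hn, List.nodup_singleton x, ?_⟩
        intro a ha b hb hab
        exact hx ((hab.trans (List.mem_singleton.mp hb)) ▸ ha)
      · intro k
        rw [List.mem_append, List.mem_singleton, hmem k, List.count_append]
        by_cases hk : k = x
        · subst hk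
          simp
          omega
        · have hxk : ¬ x = k := fun h => hk h.symm
          simp [hxk, hk]
      · simp only [List.length_append, List.length_singleton]
        push_cast
        omega

theorem solution_spec_aux (files : List String) : solution files = solution_alt files := by
  simp only [solution, solution_alt]
  rw [solutionA_foldl, PySem.Dict.items_counter]
  obtain ⟨hn, hmem, hlen⟩ := solutionB_foldl files
  set st := files.foldl
    (fun (st : PySem.Set String × Int) f =>
      if PySem.Set.contains st.1 f then (PySem.Set.discard st.1 f, st.2 + 1)
      else (PySem.Set.add st.1 f, st.2))
    (PySem.Set.empty, 0) with hst
  set D := PySem.Set.ofList files with hD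
  -- the value sum over the counter is the length of files
  have hsum : ((D.map (fun k => (k, (files.count k : Int)))).map (·.2)).sum
      = (files.length : Int) := by
    rw [List.map_map]
    have hDn : D.Nodup := PySem.Set.nodup_ofList files
    have hfin : D.toFinset = files.toFinset := by
      ext k; simp [List.mem_toFinset, hD, PySem.Set.mem_ofList]
    have := List.sum_toFinset (l := D) (f := fun k => (files.count k : Int)) hDn
    rw [hfin] at this
    rw [Function.comp_def, ← this]
    rw [show (∑ a ∈ files.toFinset, (files.count a : Int))
        = ((∑ a ∈ files.toFinset, files.count a : Nat) : Int) by push_cast; rfl]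
    rw [List.sum_toFinset_count_eq_length]
  -- the odd-count over counter items equals the length of B's leftover set
  have hcount : ((D.map (fun k => (k, (files.count k : Int)))).countP
      (fun kv => PySem.Int.mod kv.2 2 == 1) : Int) = (st.1.length : Int) := by
    rw [List.countP_map]
    have h1 : D.countP ((fun kv : String × Int => PySem.Int.mod kv.2 2 == 1) ∘
        (fun k => (k, (files.count k : Int)))) = (D.filter
        (fun k => files.count k % 2 == 1)).length := by
      rw [List.countP_eq_length_filter]
      congr 1
      apply List.filter_congr
      intro k _
      simp only [Function.comp_apply]
      exact pymod_two_cast (files.count k)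
    rw [h1]
    have hperm : (D.filter (fun k => files.count k % 2 == 1)).Perm st.1 := by
      refine (List.perm_ext_iff_of_nodup ((PySem.Set.nodup_ofList files).filter _) hn).mpr ?_
      intro k
      rw [List.mem_filter, hmem k, PySem.Set.mem_ofList]
      
      constructor
      · rintro ⟨-, h⟩; simpa using h
      · intro h; exact ⟨List.count_pos_iff.mp (by omega), by simpa using h⟩
    rw [hperm.length_eq]
  -- the flags agree: the leftover set is nonempty iff some count is odd
  have hflag : ((D.map (fun k => (k, (files.count k : Int)))).countP
      (fun kv => PySem.Int.mod kv.2 2 == 1) = 0) ↔ st.1 = [] := by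
    constructor
    · intro h
      have : (st.1.length : Int) = 0 := by rw [← hcount]; exact_mod_cast congrArg Nat.cast h
      exact List.length_eq_zero_iff.mp (by exact_mod_cast this)
    · intro h
      have : (st.1.length : Int) = 0 := by rw [h]; simp
      have := hcount.trans this
      exact_mod_cast this
  rw [hsum]
  dsimp only
  by_cases h0 : st.1 = []
  · rw [if_pos (hflag.mpr h0), if_neg (by simp [h0])]
    have : (st.1.length : Int) = 0 := by rw [h0]; simp
    rw [hcount, this]
    omega
  · rw [if_neg (fun h => h0 (hflag.mp h)), if_pos h0, hcount]
    omega

-- ===== VERDICT (by name: the statement is the Claim_ definition above) =====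
theorem solution_spec : Claim_equal_solution := by
  intro files _
  exact solution_spec_aux files
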